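-- pv_equiv track=rewrite | github.com/mpaolodr/p_problems | codesignal/fibsum.py | fibonacciSimpleSum2
-- ===== SOURCE A (Python) =====
-- def fibonacciSimpleSum2(n):
--
--     if n == 1:
--
--         return True
--
--     if n == 0:
--
--         return False
--
--     reference = dict_gen(n)
--
--     for key in reference:
--
--         if key <= n:
--
--             if n - key in reference:
--
--                 return True
--
--         else:
--
--             break
--
--     return False
--
-- def fibo(n, cache=None):
--
--     if cache is None:
--
--         cache = dict()
--
--     if n in cache:
--
--         return cache[n]
--
--     else:
--
--         if n == 0:
--
--             return 0
--
--         if n == 1: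
--
--             return 1
--
--         value = fibo(n - 1, cache) + fibo(n - 2, cache)
--         cache[n] = value
--
--         return cache[n]
--
-- def dict_gen(n):
--
--     memory = dict()
--
--     for num in range(n + 1):
--
--         memory[fibo(num)] = None
--
--     return memory
-- ===== SOURCE B (Python) =====
-- def fibonacciSimpleSum2(n):
--     # Generate only the Fibonacci numbers <= n into a set, then check complements.
--     fibs = set()
--     a, b = 0, 1
--     while a <= n:
--         fibs.add(a)
--         a, b = b, a + b
--     return any(n - x in fibs for x in fibs)
-- ===== Notes on version B (the rewrite author's own statement) =====
-- stated objective: faster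
-- what changed: Instead of memo-building a dict of the first n+1 Fibonacci numbers (huge bigints, recomputed per index with a fresh cache) and scanning its keys, B iterates the Fibonacci pair (a,b) only while a <= n, collecting the O(log n) Fibonacci values <= n into a set, and checks complements there.
-- intended difference: On n = 0 A returns False because of an explicit early 'if n == 0: return False' guard, while B returns True; 0 = 0 + 0 is a sum of two Fibonacci numbers, so True is the intended value. — e.g. on fibonacciSimpleSum2(0): A returns false, B returns true
import Mathlib
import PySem

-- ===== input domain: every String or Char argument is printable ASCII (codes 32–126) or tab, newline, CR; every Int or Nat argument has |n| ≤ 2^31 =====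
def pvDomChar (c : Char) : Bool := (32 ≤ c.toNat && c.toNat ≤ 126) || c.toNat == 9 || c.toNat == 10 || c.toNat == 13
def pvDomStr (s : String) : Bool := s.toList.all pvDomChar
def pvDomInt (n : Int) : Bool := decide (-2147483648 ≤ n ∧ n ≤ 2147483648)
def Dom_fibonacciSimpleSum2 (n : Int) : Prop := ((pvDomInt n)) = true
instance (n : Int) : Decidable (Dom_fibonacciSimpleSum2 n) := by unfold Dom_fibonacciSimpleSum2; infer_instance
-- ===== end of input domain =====

-- B replaces A's dict of the first n+1 Fibonacci numbers (each recomputed with a fresh memo cache)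
-- by a single loop generating only the Fibonacci values <= n into a set, then checks complements.
-- Intended difference: A returns False on n = 0 (explicit guard); B returns True, since 0 = 0 + 0.


-- ===== PORT A =====
-- fibo(n, cache): memoized recursion, the cache dict threaded through the calls.
def fiboA : Nat → PySem.Dict Int Int → Int × PySem.Dict Int Int
  | n, cache =>
    match cache.get? (n : Int) with
    | some v => (v, cache)
    | none =>
      match n with
      | 0 => (0, cache)
      | 1 => (1, cache)
      | (m + 2) =>
        let r1 := fiboA (m + 1) cache
        let r2 := fiboA m r1.2
        let v := r1.1 + r2.1
        (v, (r2.2.insert ((m + 2 : Nat) : Int) v))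
  termination_by n _ => n
  decreasing_by all_goals omega

-- dict_gen(n): memory[fibo(num)] = None for num in range(n+1); fibo starts with a fresh cache
-- each call (Python default cache=None).  num.toNat is exact: pyRange 0 (n+1) 1 is nonnegative.
def dictGenA (n : Int) : PySem.Dict Int Unit :=
  (PySem.List.pyRange 0 (n + 1) 1).foldl
    (fun memory num => memory.insert (fiboA num.toNat PySem.Dict.empty).1 ()) PySem.Dict.empty

-- the 'for key in reference: … else: break' loop over the dict's (insertion-ordered) keys
def loopA (n : Int) (ref : PySem.Dict Int Unit) : List Int → Bool
  | [] => false
  | key :: rest =>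
    if key ≤ n then
      if ref.contains (n - key) then true else loopA n ref rest
    else false

def fibonacciSimpleSum2 (n : Int) : Bool :=
  if n = 1 then true
  else if n = 0 then false
  else
    let reference := dictGenA n
    loopA n reference reference.keys

-- ===== PORT B =====
-- while a <= n: fibs.add(a); a, b = b, a + b   (the proof arguments only justify termination)
def fibLoopB (n a b : Int) (fibs : PySem.Set Int) (ha : 0 ≤ a) (hb : 0 < b) : PySem.Set Int :=
  if h : a ≤ n then fibLoopB n b (a + b) (fibs.add a) (le_of_lt hb) (by omega) else fibs
  termination_by ((n + 1 - a).toNat + (n + 1 - b).toNat)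
  decreasing_by omega

def fibonacciSimpleSum2_alt (n : Int) : Bool :=
  let fibs := fibLoopB n 0 1 PySem.Set.empty (le_refl 0) one_pos
  fibs.any (fun x => PySem.Set.contains fibs (n - x))

-- ===== PRECONDITION & SPEC =====
-- On n = 0, A returns False (explicit guard) while B returns True; 0 = 0 + 0 is a sum of two
-- Fibonacci numbers, so True is the intended value.
def D_fibonacciSimpleSum2 (n : Int) : Prop := n = 0
instance (n : Int) : Decidable (D_fibonacciSimpleSum2 n) := by unfold D_fibonacciSimpleSum2; infer_instance

def Spec_fibonacciSimpleSum2 (n : Int) (out : Bool) : Prop :=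
  ¬ D_fibonacciSimpleSum2 n → out = fibonacciSimpleSum2_alt n
instance (n : Int) (out : Bool) : Decidable (Spec_fibonacciSimpleSum2 n out) := by
  unfold Spec_fibonacciSimpleSum2; infer_instance

def pvDiffWitness_fibonacciSimpleSum2 : Int := 0
def pvDiffWitnessOut_fibonacciSimpleSum2 : Bool × Bool := (false, true)

-- ===== CLAIM (what is proved, stated in full; the proofs are below) =====
def Claim_unchanged_fibonacciSimpleSum2 : Prop :=
  ∀ (n : Int), Dom_fibonacciSimpleSum2 n → Spec_fibonacciSimpleSum2 n (fibonacciSimpleSum2 n)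
def Claim_changed_fibonacciSimpleSum2 : Prop :=
  Dom_fibonacciSimpleSum2 (pvDiffWitness_fibonacciSimpleSum2) ∧
  D_fibonacciSimpleSum2 (pvDiffWitness_fibonacciSimpleSum2) ∧
  fibonacciSimpleSum2 (pvDiffWitness_fibonacciSimpleSum2) = pvDiffWitnessOut_fibonacciSimpleSum2.1 ∧
  fibonacciSimpleSum2_alt (pvDiffWitness_fibonacciSimpleSum2) = pvDiffWitnessOut_fibonacciSimpleSum2.2 ∧
  pvDiffWitnessOut_fibonacciSimpleSum2.1 ≠ pvDiffWitnessOut_fibonacciSimpleSum2.2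
def Claim_exact_fibonacciSimpleSum2 : Prop :=
  ∀ (n : Int), Dom_fibonacciSimpleSum2 n → D_fibonacciSimpleSum2 n →
    fibonacciSimpleSum2 n ≠ fibonacciSimpleSum2_alt n


-- ===== LEMMAS AND PROOFS =====

-- the Fibonacci numbers as integers
def F (i : Nat) : Int := (Nat.fib i : Int)

theorem F_nonneg (i : Nat) : 0 ≤ F i := Int.natCast_nonneg _

theorem F_mono {i j : Nat} (h : i ≤ j) : F i ≤ F j := by
  unfold F; exact_mod_cast Nat.fib_mono h

theorem F_add_two (i : Nat) : F (i + 2) = F i + F (i + 1) := by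
  unfold F; exact_mod_cast Nat.fib_add_two

theorem fiboA_correct (n : Nat) (cache : PySem.Dict Int Int)
    (h : ∀ k v, cache.get? k = some v → 0 ≤ k ∧ v = F k.toNat) :
    (fiboA n cache).1 = F n ∧
      (∀ k v, (fiboA n cache).2.get? k = some v → 0 ≤ k ∧ v = F k.toNat) := by
  induction n using Nat.strong_induction_on generalizing cache with
  | _ n ih =>
    rcases n with _ | _ | m
    · rw [fiboA]
      cases hg : cache.get? ((0 : Nat) : Int) with
      | some v => exact ⟨by simpa [F] using (h _ _ hg).2, h⟩
      | none => exact ⟨by simp [F], h⟩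
    · rw [fiboA]
      cases hg : cache.get? ((1 : Nat) : Int) with
      | some v => exact ⟨by simpa [F] using (h _ _ hg).2, h⟩
      | none => exact ⟨by simp [F], h⟩
    · rw [fiboA]
      cases hg : cache.get? ((m + 2 : Nat) : Int) with
      | some v => exact ⟨by simpa [F] using (h _ _ hg).2, h⟩
      | none =>
        dsimp only
        obtain ⟨e1, h1⟩ := ih (m + 1) (by omega) cache h
        obtain ⟨e2, h2⟩ := ih m (by omega) (fiboA (m + 1) cache).2 h1
        refine ⟨by rw [e1, e2, F_add_two]; ring, ?_⟩
        intro k v hk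
        rw [PySem.Dict.get?_insert] at hk
        split_ifs at hk with hkk
        · subst hkk
          refine ⟨by positivity, ?_⟩
          injection hk with hv
          rw [← hv, e1, e2, Int.toNat_natCast, F_add_two]
          ring
        · exact h2 k v hk

theorem loopA_iff (n : Int) (ref : PySem.Dict Int Unit) (L : List Int)
    (hs : L.Pairwise (· ≤ ·)) :
    loopA n ref L = true ↔ ∃ k ∈ L, k ≤ n ∧ ref.contains (n - k) = true := by
  induction L with
  | nil => simp [loopA]
  | cons k rest ih =>
    rw [List.pairwise_cons] at hs
    rw [loopA]
    split_ifs with hkn hc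
    · simp only [true_iff]
      exact ⟨k, List.mem_cons_self, hkn, hc⟩
    · rw [ih hs.2]
      constructor
      · rintro ⟨k', hk', hle, hcon⟩; exact ⟨k', List.mem_cons_of_mem _ hk', hle, hcon⟩
      · rintro ⟨k', hk', hle, hcon⟩
        rcases List.mem_cons.mp hk' with rfl | hmem
        · exact absurd hcon (by simp [hc])
        · exact ⟨k', hmem, hle, hcon⟩
    · simp only [false_iff]
      rintro ⟨k', hk', hle, -⟩
      rcases List.mem_cons.mp hk' with rfl | hmem
      · exact hkn hle
      · exact hkn (le_trans (hs.1 k' hmem) hle)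

theorem mem_fibLoopB (n : Int) (K : Nat) :
    ∀ (i : Nat) (a b : Int) (s : PySem.Set Int) (ha : 0 ≤ a) (hb : 0 < b) (x : Int),
      a = F i → b = F (i + 1) → (n + 1 - a).toNat + (n + 1 - b).toNat = K →
      (x ∈ fibLoopB n a b s ha hb ↔ x ∈ s ∨ ∃ j, i ≤ j ∧ F j ≤ n ∧ F j = x) := by
  induction K using Nat.strong_induction_on with
  | _ K ih =>
    intro i a b s ha hb x hai hbi hK
    rw [fibLoopB]
    split_ifs with hle
    · rw [ih ((n + 1 - b).toNat + (n + 1 - (a + b)).toNat) (by omega) (i + 1) b (a + b)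
        (s.add a) (le_of_lt hb) (by omega) x hbi (by rw [hai, hbi, F_add_two]) rfl]
      rw [PySem.Set.mem_add]
      constructor
      · rintro ((hxs | rfl) | ⟨j, hij, hjn, hjx⟩)
        · exact Or.inl hxs
        · exact Or.inr ⟨i, le_refl i, by rw [← hai]; exact hle, hai.symm⟩
        · exact Or.inr ⟨j, by omega, hjn, hjx⟩
      · rintro (hxs | ⟨j, hij, hjn, hjx⟩)
        · exact Or.inl (Or.inl hxs)
        · rcases Nat.eq_or_lt_of_le hij with rfl | hlt
          · exact Or.inl (Or.inr (by rw [← hjx, hai]))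
          · exact Or.inr ⟨j, by omega, hjn, hjx⟩
    · constructor
      · exact fun hxs => Or.inl hxs
      · rintro (hxs | ⟨j, hij, hjn, hjx⟩)
        · exact hxs
        · exact absurd (le_trans (by rw [hai]; exact F_mono hij) hjn) hle

theorem fib_gt (m : Nat) (h : 4 ≤ m) : m < Nat.fib (m + 1) := by
  induction m, h using Nat.le_induction with
  | base => decide
  | succ m hm ihm =>
    show m + 1 < Nat.fib (m + 2)
    have h1 : Nat.fib (m + 2) = Nat.fib m + Nat.fib (m + 1) := Nat.fib_add_two
    have h2 : 0 < Nat.fib m := Nat.fib_pos.mpr (by omega)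
    omega

theorem fib_succ_gt (m : Nat) (h : 4 ≤ m) : (m : Int) < F (m + 1) := by
  unfold F; exact_mod_cast fib_gt m h

-- PySem.Set.ofList keeps first occurrences in order, so it preserves (· ≤ ·)-chains
theorem ofList_pairwise_le (xs : List Int) (h : xs.Pairwise (· ≤ ·)) :
    (PySem.Set.ofList xs).Pairwise (· ≤ ·) := by
  induction xs with
  | nil => simp [PySem.Set.ofList_nil]
  | cons x xs ih =>
    rw [List.pairwise_cons] at h
    rw [PySem.Set.ofList_cons, List.pairwise_cons]
    refine ⟨?_, ?_⟩
    · intro y hy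
      have : y ∈ PySem.Set.ofList xs := ((PySem.Set.mem_discard _ _ _).mp hy).1
      exact h.1 y ((PySem.Set.mem_ofList _ _).mp this)
    · exact (ih h.2).sublist List.filter_sublist

-- A's condition as a plain existential over Fibonacci indices
theorem portA_iff (n : Int) (h1 : ¬ n = 1) (h0 : ¬ n = 0) :
    fibonacciSimpleSum2 n = true ↔
      ∃ i j : Nat, i < (n + 1).toNat ∧ j < (n + 1).toNat ∧ F i ≤ n ∧ F i + F j = n := by
  have hkeys : (dictGenA n).keys =
      PySem.Set.ofList ((List.range (n + 1).toNat).map F) := by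
    unfold dictGenA
    rw [PySem.Dict.keys_foldl_insert_key (PySem.List.pyRange 0 (n + 1) 1)
      (fun num => (fiboA num.toNat PySem.Dict.empty).1) (fun _ _ => ()) PySem.Dict.empty]
    have hmap : (PySem.List.pyRange 0 (n + 1) 1).map
        (fun num => (fiboA num.toNat PySem.Dict.empty).1) =
        (List.range (n + 1).toNat).map F := by
      rw [PySem.List.pyRange_one, List.map_map, sub_zero]
      refine List.map_congr_left ?_
      intro k hk
      show (fiboA ((0 : Int) + (k : Int)).toNat PySem.Dict.empty).1 = F k
      rw [zero_add, Int.toNat_natCast]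
      exact (fiboA_correct k PySem.Dict.empty (by simp [PySem.Dict.get?_empty])).1
    rw [hmap, PySem.Dict.keys_empty, ← PySem.Set.empty_eq, PySem.Set.update_empty]
  have hmem : ∀ x : Int, x ∈ (dictGenA n).keys ↔ ∃ i : Nat, i < (n + 1).toNat ∧ F i = x := by
    intro x
    rw [hkeys, PySem.Set.mem_ofList]
    simp [List.mem_map, List.mem_range]
  have hcon : ∀ x : Int, (dictGenA n).contains x = true ↔
      ∃ i : Nat, i < (n + 1).toNat ∧ F i = x := by
    intro x; rw [PySem.Dict.contains_iff_mem_keys]; exact hmem x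
  have hsorted : (dictGenA n).keys.Pairwise (· ≤ ·) := by
    rw [hkeys]
    refine ofList_pairwise_le _ ?_
    exact List.pairwise_lt_range.map F (fun a b hab => F_mono (le_of_lt hab))
  simp only [fibonacciSimpleSum2, if_neg h1, if_neg h0]
  rw [loopA_iff n (dictGenA n) (dictGenA n).keys hsorted]
  constructor
  · rintro ⟨k, hk, hkn, hcont⟩
    obtain ⟨i, hiK, rfl⟩ := (hmem k).mp hk
    obtain ⟨j, hjK, hj⟩ := (hcon (n - F i)).mp hcont
    exact ⟨i, j, hiK, hjK, hkn, by omega⟩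
  · rintro ⟨i, j, hiK, hjK, hFi, hsum⟩
    refine ⟨F i, (hmem (F i)).mpr ⟨i, hiK, rfl⟩, hFi, (hcon (n - F i)).mpr ⟨j, hjK, by omega⟩⟩

-- B's condition as a plain existential over Fibonacci indices
theorem portB_iff (n : Int) :
    fibonacciSimpleSum2_alt n = true ↔
      ∃ i j : Nat, F i ≤ n ∧ F j ≤ n ∧ F i + F j = n := by
  have hm : ∀ x : Int,
      x ∈ fibLoopB n 0 1 PySem.Set.empty (le_refl 0) one_pos ↔
        ∃ j : Nat, F j ≤ n ∧ F j = x := by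
    intro x
    rw [mem_fibLoopB n ((n + 1 - 0).toNat + (n + 1 - 1).toNat) 0 0 1 PySem.Set.empty
      (le_refl 0) one_pos x (by simp [F]) (by simp [F]) rfl]
    rw [PySem.Set.empty_eq]
    simp
  simp only [fibonacciSimpleSum2_alt, List.any_eq_true]
  constructor
  · rintro ⟨x, hx, hcont⟩
    obtain ⟨i, hFi, rfl⟩ := (hm x).mp hx
    obtain ⟨j, hFj, hj⟩ :=
      (hm (n - F i)).mp ((PySem.Set.contains_iff _ _).mp hcont)
    exact ⟨i, j, hFi, hFj, by omega⟩
  · rintro ⟨i, j, hFi, hFj, hsum⟩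
    refine ⟨F i, (hm (F i)).mpr ⟨i, hFi, rfl⟩, ?_⟩
    exact (PySem.Set.contains_iff _ _).mpr ((hm (n - F i)).mpr ⟨j, hFj, by omega⟩)

theorem F_zero : F 0 = 0 := by simp [F]
theorem F_one : F 1 = 1 := by simp [F]
theorem F_two : F 2 = 1 := by simp [F]
theorem F_three : F 3 = 2 := by unfold F; norm_num [Nat.fib_add_two, Nat.fib_one, Nat.fib_two]

theorem portB_zero : fibonacciSimpleSum2_alt 0 = true :=
  (portB_iff 0).mpr ⟨0, 0, le_of_eq F_zero, le_of_eq F_zero, by norm_num [F_zero]⟩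

theorem portA_zero : fibonacciSimpleSum2 0 = false := by simp [fibonacciSimpleSum2]

-- ===== VERDICT (by name: the statement is the Claim_ definition above) =====
theorem fibonacciSimpleSum2_spec : Claim_unchanged_fibonacciSimpleSum2 := by
  intro n _ hD
  unfold D_fibonacciSimpleSum2 at hD
  by_cases h1 : n = 1
  · subst h1
    have hA : fibonacciSimpleSum2 1 = true := by simp [fibonacciSimpleSum2]
    have hB : fibonacciSimpleSum2_alt 1 = true :=
      (portB_iff 1).mpr ⟨0, 1, by norm_num [F_zero], le_of_eq F_one, by norm_num [F_zero, F_one]⟩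
    rw [hA, hB]
  · rw [Bool.eq_iff_iff, portA_iff n h1 hD, portB_iff n]
    constructor
    · rintro ⟨i, j, hiK, hjK, hFi, hsum⟩
      have := F_nonneg i
      exact ⟨i, j, hFi, by omega, hsum⟩
    · rintro ⟨i, j, hFi, hFj, hsum⟩
      by_cases h4 : 4 ≤ n
      · have bound : ∀ m : Nat, F m ≤ n → m < (n + 1).toNat := by
          intro m hm
          by_contra hge
          push Not at hge
          have h1m : n.toNat + 1 ≤ m := by omega
          have h2m : F (n.toNat + 1) ≤ F m := F_mono h1m
          have h3m : ((n.toNat : Nat) : Int) < F (n.toNat + 1) :=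
            fib_succ_gt n.toNat (by omega)
          have h4m : ((n.toNat : Nat) : Int) = n := by omega
          omega
        exact ⟨i, j, bound i hFi, bound j hFj, hFi, hsum⟩
      · have hn0 : 0 ≤ n := le_trans (by have := F_nonneg i; have := F_nonneg j; omega)
          (le_of_eq hsum)
        have : n = 2 ∨ n = 3 := by omega
        rcases this with rfl | rfl
        · exact ⟨1, 2, by decide, by decide, by norm_num [F_one],
            by norm_num [F_one, F_two]⟩
        · exact ⟨1, 3, by decide, by decide, by norm_num [F_one],
            by norm_num [F_one, F_three]⟩

theorem fibonacciSimpleSum2_changed : Claim_changed_fibonacciSimpleSum2 := by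
  unfold Claim_changed_fibonacciSimpleSum2
  exact ⟨by decide, rfl, portA_zero, portB_zero, by decide⟩

theorem fibonacciSimpleSum2_tight : Claim_exact_fibonacciSimpleSum2 := by
  intro n _ hD
  unfold D_fibonacciSimpleSum2 at hD
  subst hD
  rw [portA_zero, portB_zero]
  decide
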